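-- pv_equiv track=rewrite | github.com/talvindersingh/k8s-optimization | ansible_optimizer/dataset_classifier/pipeline/dependency_pipeline.py | extract_collections_from_yaml_text
-- ===== SOURCE A (Python) =====
-- from typing import Dict, Iterable, List, Sequence, Set, Tuple
--
-- def extract_collections_from_yaml_text(yaml_text: str) -> List[str]:
--     collections: List[str] = []
--     lines = yaml_text.splitlines()
--     i = 0
--     while i < len(lines):
--         line = lines[i]
--         stripped = line.strip()
--         if not stripped or stripped.startswith("#"):
--             i += 1
--             continue
--         if stripped.startswith("collections:"):
--             indent = len(line) - len(line.lstrip(" "))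
--             remainder = stripped[len("collections:") :].strip()
--             if remainder:
--                 if remainder.startswith("[") and remainder.endswith("]"):
--                     items = remainder[1:-1].split(",")
--                     for item in items:
--                         value = item.strip().strip("\"'")
--                         if value:
--                             collections.append(value)
--                 else:
--                     value = remainder.strip("\"'")
--                     if value:
--                         collections.append(value)
--             else:
--                 j = i + 1
--                 while j < len(lines):
--                     next_line = lines[j]
--                     next_stripped = next_line.strip()
--                     next_indent = len(next_line) - len(next_line.lstrip(" "))
--                     if not next_stripped:
--                         j += 1
--                         continue
--                     if next_indent <= indent:
--                         break
--                     if next_stripped.startswith("- "):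
--                         value = next_stripped[2:].strip().strip("\"'")
--                         if value:
--                             collections.append(value)
--                     j += 1
--                 i = j - 1
--         i += 1
--     return collections
-- ===== SOURCE B (Python) =====
-- def extract_collections_from_yaml_text(yaml_text: str):
--     QUOTES = "\"'"
--
--     def inline_values(remainder):
--         if remainder.startswith("[") and remainder.endswith("]"):
--             return [v for v in
--                     (item.strip().strip(QUOTES) for item in remainder[1:-1].split(","))
--                     if v]
--         value = remainder.strip(QUOTES)
--         return [value] if value else []
--
--     collections = []
--     in_block = False
--     block_indent = 0
--     for line in yaml_text.splitlines():
--         stripped = line.strip()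
--         if in_block:
--             if not stripped:
--                 continue
--             indent = len(line) - len(line.lstrip(" "))
--             if indent > block_indent:
--                 if stripped.startswith("- "):
--                     value = stripped[2:].strip().strip(QUOTES)
--                     if value:
--                         collections.append(value)
--                 continue
--             in_block = False
--         # top-level handling (also reached by the line that ends a block)
--         if not stripped or stripped.startswith("#"):
--             continue
--         if stripped.startswith("collections:"):
--             remainder = stripped[len("collections:"):].strip()
--             if remainder:
--                 collections.extend(inline_values(remainder))
--             else:
--                 in_block = True
--                 block_indent = len(line) - len(line.lstrip(" "))
--     return collections
-- ===== Notes on version B (the rewrite author's own statement) =====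
-- stated objective: simpler
-- what changed: Replaced A's nested while-loops with index jumping (inner scan sets i = j - 1, the block-ending line is reprocessed) by a single linear pass over the lines carrying an (in_block, block_indent) state that falls through to the top-level handling on the line that ends a block.
import Mathlib
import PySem

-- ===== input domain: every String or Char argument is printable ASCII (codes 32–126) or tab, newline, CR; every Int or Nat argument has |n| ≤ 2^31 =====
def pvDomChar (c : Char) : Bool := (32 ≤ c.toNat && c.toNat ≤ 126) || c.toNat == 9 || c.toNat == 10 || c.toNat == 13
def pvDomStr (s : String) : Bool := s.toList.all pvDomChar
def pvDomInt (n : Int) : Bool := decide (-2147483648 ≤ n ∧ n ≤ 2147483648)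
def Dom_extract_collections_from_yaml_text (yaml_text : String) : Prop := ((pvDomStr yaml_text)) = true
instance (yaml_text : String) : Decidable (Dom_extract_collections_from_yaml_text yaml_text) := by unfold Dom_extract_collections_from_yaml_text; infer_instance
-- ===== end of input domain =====

-- B replaces A's index-jumping outer/inner while loops by a single pass over the lines carrying
-- an (in_block, block_indent) state; objective: simpler. Equal return value on all inputs.

-- shared helpers (identical sub-expressions of both Pythons)
-- hand port of len(line) - len(line.lstrip(" ")): lstrip(" ") drops exactly the leading ' ' characters, so this is exact
def pvIndent (line : List Char) : Nat := line.length - (line.dropWhile (· == ' ')).length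

def pvQuotes : List Char := ['"', '\'']

-- ===== PORT A =====
-- inner 'while j < len(lines)' loop of A: returns (final j, collections).
-- fuel only makes the recursion structural; lines.length fuel is always enough (j grows each step).
def pvInnerA (lines : List (List Char)) (indent : Nat) : Nat → Nat → List (List Char) → Nat × List (List Char)
  | 0, j, acc => (j, acc)
  | fuel + 1, j, acc =>
    if h : j < lines.length then
      let nl := lines[j]
      let ns := PySem.Chars.strip nl
      let nind := pvIndent nl
      if ns = [] then pvInnerA lines indent fuel (j+1) acc
      else if nind ≤ indent then (j, acc)
      else if PySem.Chars.startswith ns ['-', ' '] then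
        let v := PySem.Chars.stripChars (PySem.Chars.strip (PySem.Chars.slice ns (some 2) none)) pvQuotes
        pvInnerA lines indent fuel (j+1) (if v ≠ [] then acc ++ [v] else acc)
      else pvInnerA lines indent fuel (j+1) acc
    else (j, acc)

-- outer 'while i < len(lines)' loop of A (the 'i = j - 1; i += 1' resumption becomes i := j);
-- fuel again only makes the recursion structural (i strictly grows, so lines.length + 1 is enough).
def pvOuterA (lines : List (List Char)) : Nat → Nat → List (List Char) → List (List Char)
  | 0, _, acc => acc
  | fuel + 1, i, acc =>
    if h : i < lines.length then
      let line := lines[i]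
      let s := PySem.Chars.strip line
      if s = [] ∨ PySem.Chars.startswith s ['#'] then pvOuterA lines fuel (i+1) acc
      else if PySem.Chars.startswith s "collections:".toList then
        let indent := pvIndent line
        let rem := PySem.Chars.strip (PySem.Chars.slice s (some 12) none)
        if rem ≠ [] then
          let acc' :=
            if PySem.Chars.startswith rem ['['] ∧ PySem.Chars.endswith rem [']'] then
              (PySem.Chars.splitOn (PySem.Chars.slice rem (some 1) (some (-1))) [',']).foldl
                (fun a item =>
                  if PySem.Chars.stripChars (PySem.Chars.strip item) pvQuotes ≠ [] then
                    a ++ [PySem.Chars.stripChars (PySem.Chars.strip item) pvQuotes]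
                  else a) acc
            else
              if PySem.Chars.stripChars rem pvQuotes ≠ [] then
                acc ++ [PySem.Chars.stripChars rem pvQuotes]
              else acc
          pvOuterA lines fuel (i+1) acc'
        else
          let r := pvInnerA lines indent lines.length (i+1) acc
          pvOuterA lines fuel r.1 r.2
      else pvOuterA lines fuel (i+1) acc
    else acc

def extract_collections_from_yaml_text (yaml_text : String) : List String :=
  let lines := (PySem.Str.splitlines yaml_text).map String.toList
  (pvOuterA lines (lines.length + 1) 0 []).map (fun cs => String.ofList cs)

-- ===== PORT B =====
-- B's inline_values helper
def pvInline (rem : List Char) : List (List Char) :=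
  if PySem.Chars.startswith rem ['['] ∧ PySem.Chars.endswith rem [']'] then
    ((PySem.Chars.splitOn (PySem.Chars.slice rem (some 1) (some (-1))) [',']).map
      (fun item => PySem.Chars.stripChars (PySem.Chars.strip item) pvQuotes)).filter (· ≠ [])
  else
    let v := PySem.Chars.stripChars rem pvQuotes
    if v ≠ [] then [v] else []

-- B's top-level handling of one line; state = (collections, in_block, block_indent)
def pvTopB (acc : List (List Char)) (line : List Char) : List (List Char) × Bool × Nat :=
  let s := PySem.Chars.strip line
  if s = [] ∨ PySem.Chars.startswith s ['#'] then (acc, false, 0)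
  else if PySem.Chars.startswith s "collections:".toList then
    let rem := PySem.Chars.strip (PySem.Chars.slice s (some 12) none)
    if rem ≠ [] then (acc ++ pvInline rem, false, 0)
    else (acc, true, pvIndent line)
  else (acc, false, 0)

-- B's per-line step: block mode falls through to pvTopB on the line that ends a block
def pvStepB (st : List (List Char) × Bool × Nat) (line : List Char) :
    List (List Char) × Bool × Nat :=
  if st.2.1 then
    let s := PySem.Chars.strip line
    if s = [] then st
    else if st.2.2 < pvIndent line then
      if PySem.Chars.startswith s ['-', ' '] then
        let v := PySem.Chars.stripChars (PySem.Chars.strip (PySem.Chars.slice s (some 2) none)) pvQuotes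
        (if v ≠ [] then st.1 ++ [v] else st.1, st.2.1, st.2.2)
      else st
    else pvTopB st.1 line
  else pvTopB st.1 line

def extract_collections_from_yaml_text_alt (yaml_text : String) : List String :=
  ((((PySem.Str.splitlines yaml_text).map String.toList).foldl pvStepB ([], false, 0)).1).map
    (fun cs => String.ofList cs)

-- ===== PRECONDITION & SPEC =====
def Spec_extract_collections_from_yaml_text (yaml_text : String) (out : List String) : Prop := out = extract_collections_from_yaml_text_alt yaml_text
instance (yaml_text : String) (out : List String) : Decidable (Spec_extract_collections_from_yaml_text yaml_text out) := by unfold Spec_extract_collections_from_yaml_text; infer_instance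

-- ===== CLAIM (what is proved, stated in full; the proofs are below) =====
def Claim_equal_extract_collections_from_yaml_text : Prop := ∀ (yaml_text : String), Dom_extract_collections_from_yaml_text yaml_text → Spec_extract_collections_from_yaml_text yaml_text (extract_collections_from_yaml_text yaml_text)

-- ===== LEMMAS AND PROOFS =====

-- B in non-block state ignores the stored block_indent
theorem pvStepB_false (acc : List (List Char)) (bi : Nat) (line : List Char) :
    pvStepB (acc, false, bi) line = pvTopB acc line := by
  simp [pvStepB]

-- A's inner loop never moves j backwards
theorem pvInnerA_ge (lines : List (List Char)) (indent : Nat) :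
    ∀ fuel j acc, j ≤ (pvInnerA lines indent fuel j acc).1 := by
  intro fuel
  induction fuel with
  | zero => intro j acc; simp [pvInnerA]
  | succ fuel ih =>
    intro j acc
    rw [pvInnerA]
    by_cases h : j < lines.length
    · rw [dif_pos h]
      dsimp only
      split_ifs with h1 h2 h3 <;>
        first
          | exact le_trans (Nat.le_succ j) (ih (j+1) _)
          | simp
    · rw [dif_neg h]

-- A's inline foldl equals acc ++ B's inline_values
theorem pvInline_eq (rem : List Char) (acc : List (List Char)) :
    (if PySem.Chars.startswith rem ['['] = true ∧ PySem.Chars.endswith rem [']'] = true then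
      (PySem.Chars.splitOn (PySem.Chars.slice rem (some 1) (some (-1))) [',']).foldl
        (fun a item =>
          if PySem.Chars.stripChars (PySem.Chars.strip item) pvQuotes ≠ [] then
            a ++ [PySem.Chars.stripChars (PySem.Chars.strip item) pvQuotes]
          else a) acc
    else
      if PySem.Chars.stripChars rem pvQuotes ≠ [] then
        acc ++ [PySem.Chars.stripChars rem pvQuotes]
      else acc) = acc ++ pvInline rem := by
  unfold pvInline
  by_cases h : PySem.Chars.startswith rem ['['] = true ∧ PySem.Chars.endswith rem [']'] = true
  · rw [if_pos h, if_pos h]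
    rw [show (fun (a : List (List Char)) item =>
        if PySem.Chars.stripChars (PySem.Chars.strip item) pvQuotes ≠ [] then
          a ++ [PySem.Chars.stripChars (PySem.Chars.strip item) pvQuotes]
        else a)
      = (fun a item =>
        if (fun it => decide (PySem.Chars.stripChars (PySem.Chars.strip it) pvQuotes ≠ [])) item = true
        then a ++ [PySem.Chars.stripChars (PySem.Chars.strip item) pvQuotes] else a) from by
        funext a item; simp]
    rw [PySem.List.foldl_append_if]
    rw [List.filter_map]
    rfl
  · rw [if_neg h, if_neg h]
    by_cases hv : PySem.Chars.stripChars rem pvQuotes = [] <;> simp [hv]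

-- B run in block mode equals A's inner loop followed by B resumed in non-block mode
theorem pvInner_eq (lines : List (List Char)) (indent : Nat) :
    ∀ fuel j acc, lines.length ≤ j + fuel →
    (((lines.drop j).foldl pvStepB (acc, true, indent)).1)
      = (((lines.drop (pvInnerA lines indent fuel j acc).1).foldl pvStepB
          ((pvInnerA lines indent fuel j acc).2, false, 0)).1) := by
  intro fuel
  induction fuel with
  | zero =>
    intro j acc hj
    simp [pvInnerA, List.drop_eq_nil_of_le (by omega : lines.length ≤ j)]
  | succ fuel ih =>
    intro j acc hj
    rw [pvInnerA]
    by_cases h : j < lines.length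
    · rw [dif_pos h, List.drop_eq_getElem_cons h]
      dsimp only
      simp only [List.foldl_cons]
      by_cases h1 : PySem.Chars.strip lines[j] = []
      · rw [if_pos h1,
          show pvStepB (acc, true, indent) lines[j] = (acc, true, indent) from by
            simp [pvStepB, h1]]
        exact ih (j+1) acc (by omega)
      · rw [if_neg h1]
        by_cases h2 : pvIndent lines[j] ≤ indent
        · rw [if_pos h2]
          rw [show pvStepB (acc, true, indent) lines[j] = pvTopB acc lines[j] from by
            simp [pvStepB, h1, show ¬ indent < pvIndent lines[j] from by omega]]
          rw [List.drop_eq_getElem_cons h, List.foldl_cons, pvStepB_false]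
        · rw [if_neg h2]
          by_cases h3 : PySem.Chars.startswith (PySem.Chars.strip lines[j]) ['-', ' '] = true
          · rw [if_pos h3]
            rw [show pvStepB (acc, true, indent) lines[j]
                = ((if PySem.Chars.stripChars (PySem.Chars.strip (PySem.Chars.slice (PySem.Chars.strip lines[j]) (some 2) none)) pvQuotes ≠ []
                    then acc ++ [PySem.Chars.stripChars (PySem.Chars.strip (PySem.Chars.slice (PySem.Chars.strip lines[j]) (some 2) none)) pvQuotes]
                    else acc), true, indent) from by
              simp [pvStepB, h1, show indent < pvIndent lines[j] from by omega, h3]]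
            exact ih (j+1) _ (by omega)
          · rw [if_neg h3]
            rw [show pvStepB (acc, true, indent) lines[j] = (acc, true, indent) from by
              simp [pvStepB, h1, show indent < pvIndent lines[j] from by omega, h3]]
            exact ih (j+1) acc (by omega)
    · rw [dif_neg h]
      simp [List.drop_eq_nil_of_le (by omega : lines.length ≤ j)]

-- the main loop correspondence: A's outer loop = B's fold
theorem pvOuter_eq (lines : List (List Char)) :
    ∀ fuel i acc, lines.length + 1 ≤ i + fuel →
    pvOuterA lines fuel i acc = (((lines.drop i).foldl pvStepB (acc, false, 0)).1) := by
  intro fuel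
  induction fuel with
  | zero =>
    intro i acc hi
    simp [pvOuterA, List.drop_eq_nil_of_le (by omega : lines.length ≤ i)]
  | succ fuel ih =>
    intro i acc hi
    rw [pvOuterA]
    by_cases h : i < lines.length
    · rw [dif_pos h, List.drop_eq_getElem_cons h]
      dsimp only
      simp only [List.foldl_cons]
      rw [pvStepB_false]
      by_cases h1 : PySem.Chars.strip lines[i] = [] ∨ PySem.Chars.startswith (PySem.Chars.strip lines[i]) ['#'] = true
      · rw [if_pos h1,
          show pvTopB acc lines[i] = (acc, false, 0) from by
            simp only [pvTopB]; rw [if_pos h1]]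
        exact ih (i+1) acc (by omega)
      · rw [if_neg h1]
        by_cases h2 : PySem.Chars.startswith (PySem.Chars.strip lines[i]) "collections:".toList = true
        · rw [if_pos h2]
          by_cases h3 : PySem.Chars.strip (PySem.Chars.slice (PySem.Chars.strip lines[i]) (some 12) none) ≠ []
          · rw [if_pos h3,
              show pvTopB acc lines[i]
                = (acc ++ pvInline (PySem.Chars.strip (PySem.Chars.slice (PySem.Chars.strip lines[i]) (some 12) none)), false, 0) from by
                simp only [pvTopB]; rw [if_neg h1, if_pos h2, if_pos h3]]
            rw [ih (i+1) _ (by omega), pvInline_eq]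
          · rw [if_neg h3,
              show pvTopB acc lines[i] = (acc, true, pvIndent lines[i]) from by
                simp only [pvTopB]; rw [if_neg h1, if_pos h2, if_neg h3]]
            have hge := pvInnerA_ge lines (pvIndent lines[i]) lines.length (i+1) acc
            rw [ih _ _ (by omega)]
            exact (pvInner_eq lines (pvIndent lines[i]) lines.length (i+1) acc (by omega)).symm
        · rw [if_neg h2,
            show pvTopB acc lines[i] = (acc, false, 0) from by
              simp only [pvTopB]; rw [if_neg h1, if_neg h2]]
          exact ih (i+1) acc (by omega)
    · rw [dif_neg h, List.drop_eq_nil_of_le (by omega : lines.length ≤ i)]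
      rfl

-- ===== VERDICT (by name: the statement is the Claim_ definition above) =====
theorem extract_collections_from_yaml_text_spec : Claim_equal_extract_collections_from_yaml_text := by
  intro yaml_text _
  unfold Spec_extract_collections_from_yaml_text
  simp only [extract_collections_from_yaml_text, extract_collections_from_yaml_text_alt]
  rw [pvOuter_eq _ _ 0 [] (by omega), List.drop_zero]
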